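-- pv_equiv track=rewrite | github.com/RahulKB31/Python-Challenge-Codes | p4.py | shortAndLongString
-- ===== SOURCE A (Python) =====
-- def shortAndLongString(strList):
--     '''
--     returns lists containg all strings in strList with length<5
--     and all strings with length > 7
--     also removes those strings from strList
--     argument: strList: list of strings
--     return: tuple containing 2 lists of strings
--     '''
--     shorts = []
--     longs = []
--     # iterate through a copy of strList, since its not safe to remove
--     # items form a list while iterating through it
--     # remember we can use L[:] to get a copy of L
--     for string in strList[:]:
--         if len(string) < 5:
--             shorts.append(string)
--             strList.remove(string)
--         elif len(string) > 7:
--             longs.append(string)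
--             strList.remove(string)
--     return shorts, longs
-- ===== SOURCE B (Python) =====
-- def shortAndLongString(strList):
--     '''Same return value as A; also performs the same in-place removal of
--     short/long strings from strList (via slice assignment instead of repeated remove).'''
--     shorts = [s for s in strList if len(s) < 5]
--     longs = [s for s in strList if len(s) > 7]
--     strList[:] = [s for s in strList if 5 <= len(s) <= 7]
--     return shorts, longs
-- ===== Notes on version B (the rewrite author's own statement) =====
-- stated objective: faster
-- what changed: Replaces the loop that mutates strList with list.remove (an O(n) scan per removal) by three linear filter passes, rebuilding strList once with slice assignment.
import Mathlib
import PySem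

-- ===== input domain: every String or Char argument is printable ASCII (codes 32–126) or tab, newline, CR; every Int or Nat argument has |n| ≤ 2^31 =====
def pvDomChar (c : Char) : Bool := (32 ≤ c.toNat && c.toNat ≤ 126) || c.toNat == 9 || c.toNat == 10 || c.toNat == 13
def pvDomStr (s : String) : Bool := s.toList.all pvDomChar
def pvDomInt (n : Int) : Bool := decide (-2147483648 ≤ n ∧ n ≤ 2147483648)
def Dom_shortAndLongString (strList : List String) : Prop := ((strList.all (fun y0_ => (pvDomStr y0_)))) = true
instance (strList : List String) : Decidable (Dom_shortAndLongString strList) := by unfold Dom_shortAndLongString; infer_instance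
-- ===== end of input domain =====

-- B replaces A's remove-inside-loop (O(n^2)) by linear filter passes; both mutate the
-- Python argument identically, and the equivalence proved here is about the return value.

-- ===== PORT A =====
-- loop over strList[:] carrying (shorts, longs, current strList); strList.remove(s) is
-- PySem.List.remove? on the mutated list (always some here, since each processed element
-- still has an occurrence; .getD keeps the state total without changing any reached value)
def shortAndLongString (strList : List String) : List String × List String :=
  let r := strList.foldl
    (fun (st : List String × List String × List String) s =>
      if PySem.Str.len s < 5 then
        (st.1 ++ [s], st.2.1, ((PySem.List.remove? st.2.2 s).getD st.2.2))
      else if PySem.Str.len s > 7 then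
        (st.1, st.2.1 ++ [s], ((PySem.List.remove? st.2.2 s).getD st.2.2))
      else st)
    ([], [], strList)
  (r.1, r.2.1)

-- ===== PORT B =====
def shortAndLongString_alt (strList : List String) : List String × List String :=
  (strList.filter (fun s => PySem.Str.len s < 5),
   strList.filter (fun s => PySem.Str.len s > 7))

-- ===== PRECONDITION & SPEC =====
def Spec_shortAndLongString (strList : List String) (out : List String × List String) : Prop := out = shortAndLongString_alt strList
instance (strList : List String) (out : List String × List String) : Decidable (Spec_shortAndLongString strList out) := by unfold Spec_shortAndLongString; infer_instance

-- ===== CLAIM (what is proved, stated in full; the proofs are below) =====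
def Claim_equal_shortAndLongString : Prop := ∀ (strList : List String), Dom_shortAndLongString strList → Spec_shortAndLongString strList (shortAndLongString strList)

-- ===== LEMMAS AND PROOFS =====

-- A's fold appends exactly the filtered elements to the shorts/longs accumulators,
-- whatever the carried mutated list is.
theorem shortAndLongString_fold (l : List String) (sh lo cur : List String) :
    (l.foldl
      (fun (st : List String × List String × List String) s =>
        if PySem.Str.len s < 5 then
          (st.1 ++ [s], st.2.1, ((PySem.List.remove? st.2.2 s).getD st.2.2))
        else if PySem.Str.len s > 7 then
          (st.1, st.2.1 ++ [s], ((PySem.List.remove? st.2.2 s).getD st.2.2))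
        else st)
      (sh, lo, cur)).1 = sh ++ l.filter (fun s => PySem.Str.len s < 5)
    ∧ (l.foldl
      (fun (st : List String × List String × List String) s =>
        if PySem.Str.len s < 5 then
          (st.1 ++ [s], st.2.1, ((PySem.List.remove? st.2.2 s).getD st.2.2))
        else if PySem.Str.len s > 7 then
          (st.1, st.2.1 ++ [s], ((PySem.List.remove? st.2.2 s).getD st.2.2))
        else st)
      (sh, lo, cur)).2.1 = lo ++ l.filter (fun s => PySem.Str.len s > 7) := by
  induction l generalizing sh lo cur with
  | nil => simp
  | cons x xs ih =>
    by_cases h5 : PySem.Str.len x < 5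
    · have h7 : ¬ PySem.Str.len x > 7 := by
        simp only [PySem.Str.len_eq] at h5 ⊢; omega
      have key := ih (sh ++ [x]) lo ((PySem.List.remove? cur x).getD cur)
      exact ⟨by simp only [List.foldl_cons, List.filter_cons, h5, h7, decide_true,
                  decide_false, if_true, if_false, key.1, List.append_assoc,
                  List.singleton_append, Bool.false_eq_true],
             by simp only [List.foldl_cons, List.filter_cons, h5, h7, decide_true,
                  decide_false, if_true, if_false, key.2, List.append_assoc,
                  List.singleton_append, Bool.false_eq_true]⟩
    · by_cases h7 : PySem.Str.len x > 7
      · have key := ih sh (lo ++ [x]) ((PySem.List.remove? cur x).getD cur)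
        exact ⟨by simp only [List.foldl_cons, List.filter_cons, h5, h7, decide_true,
                    decide_false, if_true, if_false, key.1, List.append_assoc,
                    List.singleton_append, Bool.false_eq_true],
               by simp only [List.foldl_cons, List.filter_cons, h5, h7, decide_true,
                    decide_false, if_true, if_false, key.2, List.append_assoc,
                    List.singleton_append, Bool.false_eq_true]⟩
      · have key := ih sh lo cur
        exact ⟨by simp only [List.foldl_cons, List.filter_cons, h5, h7, decide_true,
                    decide_false, if_true, if_false, key.1, List.append_assoc,
                    List.singleton_append, Bool.false_eq_true],
               by simp only [List.foldl_cons, List.filter_cons, h5, h7, decide_true,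
                    decide_false, if_true, if_false, key.2, List.append_assoc,
                    List.singleton_append, Bool.false_eq_true]⟩

-- ===== VERDICT (by name: the statement is the Claim_ definition above) =====
theorem shortAndLongString_spec : Claim_equal_shortAndLongString := by
  intro strList _
  unfold Spec_shortAndLongString shortAndLongString shortAndLongString_alt
  have h := shortAndLongString_fold strList [] [] strList
  simp only [List.nil_append] at h
  exact Prod.ext h.1 h.2
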